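-- pv_equiv track=rewrite | github.com/m-damien/PyDictToLatex | pydict2latex/py2tex.py | factorize_cases
-- ===== SOURCE A (Python) =====
-- def factorize_cases(cases, idx=0):
--     """
--     Factorize a list of cases (i.e., a combination of parameters to access data)
--     """
--     factorized_cases = []
--
--     while len(cases) > 0:
--         case = cases.pop()
--         factorizable_cases = cases.copy()
--
--         while len(factorizable_cases) > 0:
--             factorizable_case = factorizable_cases.pop()
--
--             if len(case) > idx and len(case) == len(factorizable_case) and case[idx] != factorizable_case[idx] and case[:idx] == factorizable_case[:idx] and case[idx+1:] == factorizable_case[idx+1:]: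
--                 case = case[:idx] + [case[idx]+factorizable_case[idx]] + case[idx+1:]
--                 cases.remove(factorizable_case)
--
--
--         factorized_cases.append(case)
--
--     return factorized_cases
-- ===== SOURCE B (Python) =====
-- def factorize_cases(cases, idx=0):
--     """Bucket the cases by the (length, prefix, suffix) signature that makes two
--     cases combinable, then combine each bucket independently in pop order."""
--     groups = {}   # signature -> [(position, case)] in list order
--     inert = []    # (position, case) that idx cannot reach
--     for i, case in enumerate(cases):
--         if -len(case) <= idx < len(case):
--             key = (len(case), tuple(case[:idx]), tuple(case[idx + 1:]))
--             groups.setdefault(key, []).append((i, case))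
--         else:
--             inert.append((i, case))
--
--     results = list(inert)
--     for members in groups.values():
--         while members:
--             i, case = members.pop()
--             for _, other in members[::-1]:
--                 if other[idx] != case[idx]:
--                     case = case[:idx] + [case[idx] + other[idx]] + case[idx + 1:]
--                     # the combined case leaves the pending list
--                     for k, (_, w) in enumerate(members):
--                         if w == other:
--                             del members[k]
--                             break
--             results.append((i, case))
--
--     results.sort(key=lambda r: r[0], reverse=True)
--     return [case for _, case in results]
-- ===== Notes on version B (the rewrite author's own statement) =====
-- stated objective: faster
-- what changed: B buckets the cases once by their (length, prefix-before-idx, suffix-after-idx) signature in a dict and combines each bucket independently in pop order, instead of A's repeated full-list scans that compare the slices of every case against every other case on every round.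
-- crash fix: When idx < 0 and two cases have the same length smaller than -idx, A raises IndexError at case[idx]; B returns the cases unmerged in A's pop order. — e.g. on factorize_cases([[1], [2]], -2): A raises IndexError, B returns [[2], [1]]
import Mathlib
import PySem

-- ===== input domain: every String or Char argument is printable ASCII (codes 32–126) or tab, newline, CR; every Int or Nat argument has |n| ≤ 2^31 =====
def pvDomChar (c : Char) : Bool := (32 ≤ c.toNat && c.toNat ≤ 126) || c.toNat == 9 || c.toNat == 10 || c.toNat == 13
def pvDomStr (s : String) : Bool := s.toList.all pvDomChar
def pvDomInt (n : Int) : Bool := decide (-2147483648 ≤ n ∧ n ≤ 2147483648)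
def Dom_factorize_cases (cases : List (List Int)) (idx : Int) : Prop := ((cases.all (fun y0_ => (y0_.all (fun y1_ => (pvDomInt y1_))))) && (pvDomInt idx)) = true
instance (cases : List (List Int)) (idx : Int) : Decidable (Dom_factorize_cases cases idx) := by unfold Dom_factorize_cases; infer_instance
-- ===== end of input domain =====

-- B buckets the cases once by their (length, prefix, suffix) signature in a dict and
-- combines each bucket independently; A mutates its `cases` argument (pop/remove) while
-- B does not — the equivalence proved here is about the return value only.

-- ===== PORT A =====

-- the if-condition of A's inner loop (case[idx] via the total pyGetD: Pre_ excludes the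
-- inputs on which Python would raise IndexError here)
def fcCond (idx : Int) (case fc : List Int) : Bool :=
  decide (idx < (case.length : Int)) && ((case.length : Int) == (fc.length : Int)) &&
    (PySem.List.pyGetD case idx 0 != PySem.List.pyGetD fc idx 0) &&
    (PySem.List.slice case none (some idx) == PySem.List.slice fc none (some idx)) &&
    (PySem.List.slice case (some (idx + 1)) none == PySem.List.slice fc (some (idx + 1)) none)

-- case = case[:idx] + [case[idx]+factorizable_case[idx]] + case[idx+1:]
def fcRebuild (idx : Int) (case fc : List Int) : List Int :=
  PySem.List.slice case none (some idx) ++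
    [PySem.List.pyGetD case idx 0 + PySem.List.pyGetD fc idx 0] ++
    PySem.List.slice case (some (idx + 1)) none

-- cases.remove(fc); the .getD is a totality guard only: whenever A reaches this call an
-- equal element is present, so remove? is some
def pyRemoveD (xs : List (List Int)) (v : List Int) : List (List Int) :=
  (PySem.List.remove? xs v).getD xs

-- one step of the inner while-loop: state is (case, cases)
def fcStep (idx : Int) (st : List Int × List (List Int)) (fc : List Int) :
    List Int × List (List Int) :=
  if fcCond idx st.1 fc then (fcRebuild idx st.1 fc, pyRemoveD st.2 fc) else st

-- inner while-loop: factorizable_cases = cases.copy() is consumed by .pop() from the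
-- end, i.e. it is scanned in reverse order
def fcInner (idx : Int) (case : List Int) (cs : List (List Int)) :
    List Int × List (List Int) :=
  cs.reverse.foldl (fcStep idx) (case, cs)

theorem pyRemoveD_length_le (xs : List (List Int)) (v : List Int) :
    (pyRemoveD xs v).length ≤ xs.length := by
  unfold pyRemoveD
  by_cases h : v ∈ xs
  · rw [PySem.List.remove?_eq_some_erase _ _ h]
    simpa using List.length_erase_le (l := xs) (a := v)
  · rw [(PySem.List.remove?_eq_none_iff xs v).mpr h]
    simp

theorem fcInner_foldl_length_le (idx : Int) (l : List (List Int))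
    (st : List Int × List (List Int)) :
    (l.foldl (fcStep idx) st).2.length ≤ st.2.length := by
  induction l generalizing st with
  | nil => simp
  | cons fc t ih =>
      simp only [List.foldl_cons]
      refine le_trans (ih _) ?_
      unfold fcStep
      split
      · exact pyRemoveD_length_le _ _
      · exact le_refl _

theorem fcInner_length_le (idx : Int) (case : List Int) (cs : List (List Int)) :
    (fcInner idx case cs).2.length ≤ cs.length :=
  fcInner_foldl_length_le idx cs.reverse (case, cs)

-- outer while-loop: cases.pop() takes the last element
def fcOuter (idx : Int) (cs : List (List Int)) : List (List Int) :=
  match h : cs with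
  | [] => []
  | _ :: _ =>
      let case := cs.getLast (by simp [h])
      let rest := cs.dropLast
      let r := fcInner idx case rest
      r.1 :: fcOuter idx r.2
termination_by cs.length
decreasing_by
  have h1 := fcInner_length_le idx (cs.getLast (by simp [h])) cs.dropLast
  simp only [← h]
  have h2 : cs.dropLast.length < cs.length := by rw [h]; simp
  exact Nat.lt_of_le_of_lt h1 h2

def factorize_cases (cases : List (List Int)) (idx : Int) : List (List Int) :=
  fcOuter idx cases

-- ===== PORT B =====

-- key = (len(case), tuple(case[:idx]), tuple(case[idx+1:]))
def bKey (c : List Int) (idx : Int) : Int × List Int × List Int :=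
  ((c.length : Int), PySem.List.slice c none (some idx), PySem.List.slice c (some (idx + 1)) none)

-- 'for k, (_, w) in enumerate(members): if w == other: del members[k]; break'
def bDelFirst : List (Int × List Int) → List Int → List (Int × List Int)
  | [], _ => []
  | m :: t, w => if m.2 = w then t else m :: bDelFirst t w

-- case = case[:idx] + [case[idx] + other[idx]] + case[idx+1:]
def bRebuild (idx : Int) (case other : List Int) : List Int :=
  PySem.List.slice case none (some idx) ++
    [PySem.List.pyGetD case idx 0 + PySem.List.pyGetD other idx 0] ++
    PySem.List.slice case (some (idx + 1)) none

-- one scanned bucket member: if other[idx] != case[idx]: combine and retire it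
def bStep (idx : Int) (st : List Int × List (Int × List Int)) (qc : Int × List Int) :
    List Int × List (Int × List Int) :=
  if PySem.List.pyGetD qc.2 idx 0 != PySem.List.pyGetD st.1 idx 0 then
    (bRebuild idx st.1 qc.2, bDelFirst st.2 qc.2)
  else st

theorem bDelFirst_length_le (l : List (Int × List Int)) (w : List Int) :
    (bDelFirst l w).length ≤ l.length := by
  induction l with
  | nil => simp [bDelFirst]
  | cons m t ih =>
      unfold bDelFirst
      split
      · simp
      · simpa using Nat.succ_le_succ ih

theorem bFold_length_le (idx : Int) (u : List (Int × List Int))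
    (st : List Int × List (Int × List Int)) :
    ((u.foldl (bStep idx) st).2).length ≤ st.2.length := by
  induction u generalizing st with
  | nil => simp
  | cons e t ih =>
      simp only [List.foldl_cons]
      refine le_trans (ih _) ?_
      unfold bStep
      split
      · exact bDelFirst_length_le _ _
      · exact le_refl _

-- while members: i, case = members.pop(); for _, other in members[::-1]: …; append
def bRound (idx : Int) (members : List (Int × List Int)) : List (Int × List Int) :=
  match h : members with
  | [] => []
  | _ :: _ =>
      let m := members.getLast (by simp [h])
      let rest := members.dropLast
      let r := rest.reverse.foldl (bStep idx) (m.2, rest)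
      (m.1, r.1) :: bRound idx r.2
termination_by members.length
decreasing_by
  have h1 := bFold_length_le idx (members.dropLast.reverse)
    ((members.getLast (by simp [h])).2, members.dropLast)
  simp only [← h]
  have h2 : members.dropLast.length < members.length := by rw [h]; simp
  exact Nat.lt_of_le_of_lt h1 h2

-- one 'for i, case in enumerate(cases)' step: bucket or leave inert
def bInsert (idx : Int)
    (st : PySem.Dict (Int × List Int × List Int) (List (Int × List Int)) × List (Int × List Int))
    (ic : Int × List Int) :
    PySem.Dict (Int × List Int × List Int) (List (Int × List Int)) × List (Int × List Int) :=
  let n : Int := (ic.2.length : Int)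
  if -n ≤ idx ∧ idx < n then
    (st.1.modify (bKey ic.2 idx) [] (· ++ [ic]), st.2)
  else (st.1, st.2 ++ [ic])

def factorize_cases_alt (cases : List (List Int)) (idx : Int) : List (List Int) :=
  let st := (PySem.List.enumerate cases 0).foldl (bInsert idx) (PySem.Dict.empty, [])
  let results := st.1.items.foldl (fun acc kv => acc ++ bRound idx kv.2) st.2
  (PySem.List.sorted results (fun r => r.1) true).map (fun r => r.2)

-- ===== PRECONDITION & SPEC =====

-- Pre_ excludes exactly the inputs on which A raises IndexError: idx < 0 together with
-- two cases of equal length smaller than -idx (the comparison case[idx] is evaluated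
-- there); on every other input A returns normally.
def Pre_factorize_cases (cases : List (List Int)) (idx : Int) : Prop :=
  0 ≤ idx ∨ (cases.map List.length).Pairwise (fun (a b : Nat) => a = b → -idx ≤ (a : Int))

instance (cases : List (List Int)) (idx : Int) : Decidable (Pre_factorize_cases cases idx) := by
  unfold Pre_factorize_cases; infer_instance

def pvWitness_factorize_cases : List (List Int) × Int := ([[0, 1], [0, 2], [7]], 1)

-- When idx < 0 and two cases have the same length smaller than -idx, A raises IndexError
-- at case[idx]; B returns the cases unmerged in A's pop order.
def Raises_factorize_cases (cases : List (List Int)) (idx : Int) : Prop :=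
  idx < 0 ∧ ¬ (cases.map List.length).Pairwise (fun (a b : Nat) => a = b → -idx ≤ (a : Int))

instance (cases : List (List Int)) (idx : Int) : Decidable (Raises_factorize_cases cases idx) := by
  unfold Raises_factorize_cases; infer_instance

def pvRaiseWitness_factorize_cases : List (List Int) × Int := ([[1], [2]], -2)
def pvRaiseWitnessOut_factorize_cases : List (List Int) := [[2], [1]]

def Spec_factorize_cases (cases : List (List Int)) (idx : Int) (out : List (List Int)) : Prop :=
  out = factorize_cases_alt cases idx

instance (cases : List (List Int)) (idx : Int) (out : List (List Int)) :
    Decidable (Spec_factorize_cases cases idx out) := by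
  unfold Spec_factorize_cases; infer_instance

-- ===== CLAIM (what is proved, stated in full; the proofs are below) =====
def Claim_equal_factorize_cases : Prop :=
  ∀ (cases : List (List Int)) (idx : Int), Dom_factorize_cases cases idx →
    Pre_factorize_cases cases idx → Spec_factorize_cases cases idx (factorize_cases cases idx)

def Claim_raises_factorize_cases : Prop :=
  (∀ (cases : List (List Int)) (idx : Int), Dom_factorize_cases cases idx →
    Raises_factorize_cases cases idx → ¬ Pre_factorize_cases cases idx) ∧
  (Dom_factorize_cases (pvRaiseWitness_factorize_cases.1) (pvRaiseWitness_factorize_cases.2) ∧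
    Raises_factorize_cases (pvRaiseWitness_factorize_cases.1) (pvRaiseWitness_factorize_cases.2) ∧
    factorize_cases_alt (pvRaiseWitness_factorize_cases.1) (pvRaiseWitness_factorize_cases.2) =
      pvRaiseWitnessOut_factorize_cases)

-- ===== LEMMAS AND PROOFS =====

-- ---------- A-side: reduction to a forward process on the position-annotated pop-order list ----------

theorem pyRemoveD_nil (v : List Int) : pyRemoveD [] v = [] := by
  simp [pyRemoveD, PySem.List.remove?]

theorem pyRemoveD_cons (x v : List Int) (t : List (List Int)) :
    pyRemoveD (x :: t) v = if x = v then t else x :: pyRemoveD t v := by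
  by_cases h : x = v
  · subst h; simp [pyRemoveD]
  · rw [if_neg h]
    unfold pyRemoveD
    rw [PySem.List.remove?_cons_of_ne _ h]
    cases hr : PySem.List.remove? t v <;> simp [hr]

theorem bDelFirst_cons (x : Int × List Int) (t : List (Int × List Int)) (v : List Int) :
    bDelFirst (x :: t) v = if x.2 = v then t else x :: bDelFirst t v := by
  simp only [bDelFirst]

-- remove the last pair whose case equals v (= Python list.remove on the pop-order list)
def removeLastSnd (L : List (Int × List Int)) (v : List Int) : List (Int × List Int) :=
  (bDelFirst L.reverse v).reverse

def pStep (idx : Int) (st : List Int × List (Int × List Int)) (fc : Int × List Int) :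
    List Int × List (Int × List Int) :=
  if fcCond idx st.1 fc.2 then (fcRebuild idx st.1 fc.2, removeLastSnd st.2 fc.2) else st

theorem bDelFirst_sublist (L : List (Int × List Int)) (v : List Int) :
    (bDelFirst L v).Sublist L := by
  induction L with
  | nil => simp [bDelFirst]
  | cons x t ih =>
      unfold bDelFirst
      by_cases h : x.2 = v
      · simp [h]
      · rw [if_neg h]
        exact ih.cons₂ x

theorem removeLastSnd_sublist (L : List (Int × List Int)) (v : List Int) :
    (removeLastSnd L v).Sublist L := by
  have h := bDelFirst_sublist L.reverse v
  have := h.reverse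
  simpa [removeLastSnd] using this

theorem pFold_sublist (idx : Int) (u : List (Int × List Int)) (a : List Int)
    (R : List (Int × List Int)) :
    ((u.foldl (pStep idx) (a, R)).2).Sublist R := by
  induction u generalizing a R with
  | nil => simp
  | cons e t ih =>
      simp only [List.foldl_cons]
      unfold pStep
      by_cases h : fcCond idx a e.2
      · simp only [h, if_pos]
        exact (ih _ _).trans (removeLastSnd_sublist R e.2)
      · simp only [h, if_neg, Bool.false_eq_true, not_false_iff]
        exact ih _ _

def PProc (idx : Int) : List (Int × List Int) → List (Int × List Int)
  | [] => []
  | (p, c) :: rest =>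
      let r := rest.foldl (pStep idx) (c, rest)
      (p, r.1) :: PProc idx r.2
termination_by l => l.length
decreasing_by
  simp only [List.foldl_attach]
  have h := (pFold_sublist idx rest c rest).length_le
  simp only [List.length_cons]
  omega

theorem map_snd_bDelFirst (M : List (Int × List Int)) (v : List Int) :
    pyRemoveD (M.map (·.2)) v = (bDelFirst M v).map (·.2) := by
  induction M with
  | nil => simp [bDelFirst, pyRemoveD_nil]
  | cons x t ih =>
      simp only [List.map_cons]
      rw [pyRemoveD_cons]
      unfold bDelFirst
      by_cases h : x.2 = v
      · simp [h]
      · simp [h, ih]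

theorem map_snd_removeLastSnd (R : List (Int × List Int)) (v : List Int) :
    pyRemoveD ((R.map (·.2)).reverse) v = ((removeLastSnd R v).map (·.2)).reverse := by
  rw [← List.map_reverse, map_snd_bDelFirst]
  simp [removeLastSnd]

theorem fcFold_eq_pFold (idx : Int) (u : List (Int × List Int)) (a : List Int)
    (R : List (Int × List Int)) :
    (u.map (·.2)).foldl (fcStep idx) (a, (R.map (·.2)).reverse) =
      (((u.foldl (pStep idx) (a, R)).1), (((u.foldl (pStep idx) (a, R)).2).map (·.2)).reverse) := by
  induction u generalizing a R with
  | nil => simp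
  | cons e t ih =>
      simp only [List.map_cons, List.foldl_cons]
      unfold fcStep pStep
      by_cases h : fcCond idx a e.2
      · simp only [h, if_pos]
        rw [map_snd_removeLastSnd]
        exact ih _ _
      · simp only [h, if_neg, Bool.false_eq_true, not_false_iff]
        exact ih _ _

theorem fcOuter_ne (idx : Int) (cs : List (List Int)) (h : cs ≠ []) :
    fcOuter idx cs =
      (fcInner idx (cs.getLast h) cs.dropLast).1 ::
        fcOuter idx (fcInner idx (cs.getLast h) cs.dropLast).2 := by
  match cs with
  | a :: t => rw [fcOuter]

theorem PProc_cons (idx : Int) (p : Int) (c : List Int) (rest : List (Int × List Int)) :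
    PProc idx ((p, c) :: rest) =
      (p, (rest.foldl (pStep idx) (c, rest)).1) :: PProc idx (rest.foldl (pStep idx) (c, rest)).2 := by
  rw [PProc]

theorem fcOuter_eq_PProc (idx : Int) (M : List (Int × List Int)) :
    fcOuter idx ((M.map (·.2)).reverse) = (PProc idx M).map (·.2) := by
  induction hn : M.length using Nat.strong_induction_on generalizing M with
  | _ n ih =>
  match M with
  | [] => simp [fcOuter, PProc]
  | (p, c) :: rest =>
      have hr := fcFold_eq_pFold idx rest c rest
      set r := rest.foldl (pStep idx) (c, rest) with hrdef
      have hcs : ((((p, c) :: rest).map (·.2)).reverse) = (rest.map (·.2)).reverse ++ [c] := by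
        simp
      have hne : ((rest.map (·.2)).reverse ++ [c]) ≠ [] := by simp
      · rw [hcs, fcOuter_ne idx _ hne]
        have hlast : ((rest.map (·.2)).reverse ++ [c]).getLast hne = c := by
          simp
        have hdrop : ((rest.map (·.2)).reverse ++ [c]).dropLast = (rest.map (·.2)).reverse := by
          simp
        have hinner : fcInner idx c ((rest.map (·.2)).reverse) = (r.1, (r.2.map (·.2)).reverse) := by
          unfold fcInner
          rw [List.reverse_reverse]
          exact hr
        rw [PProc_cons]
        simp only [List.map_cons]
        congr 1
        · rw [hlast, hdrop, hinner]
        · rw [hlast, hdrop, hinner]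
          have hlen : r.2.length < n := by
            have hle := (pFold_sublist idx rest c rest).length_le
            rw [← hrdef] at hle
            simp only [List.length_cons] at hn
            omega
          exact ih r.2.length hlen r.2 rfl

-- ---------- B-side abstractions: the bucket key as a partial function on cases ----------

-- the bucket of a case: some key if the index can reach it, none if it is inert
def keyO (idx : Int) (c : List Int) : Option (Int × List Int × List Int) :=
  if -(c.length : Int) ≤ idx ∧ idx < (c.length : Int) then some (bKey c idx) else none

def filterB (idx : Int) (l : List (Int × List Int)) (k : Int × List Int × List Int) :
    List (Int × List Int) :=
  l.filter (fun pc => keyO idx pc.2 == some k)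

def inertB (idx : Int) (l : List (Int × List Int)) : List (Int × List Int) :=
  l.filter (fun pc => keyO idx pc.2 == none)

def keysetB (idx : Int) (l : List (Int × List Int)) : List (Int × List Int × List Int) :=
  PySem.Set.ofList (l.filterMap (fun pc => keyO idx pc.2))

-- the per-bucket loop, fed the bucket members in pop order
def bGroup (idx : Int) (G : List (Int × List Int)) : List (Int × List Int) :=
  bRound idx G.reverse

def gFlat (idx : Int) (ks : List (Int × List Int × List Int)) (l : List (Int × List Int)) :
    List (Int × List Int) :=
  ks.flatMap (fun k => bGroup idx (filterB idx l k))

def allB (idx : Int) (ks : List (Int × List Int × List Int)) (l : List (Int × List Int)) :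
    List (Int × List Int) :=
  inertB idx l ++ gFlat idx ks l

-- ---------- unfolding factorize_cases_alt into sorted (inert ++ buckets) ----------

def Pof (idx : Int) (l : List (Int × List Int)) :
    List ((Int × List Int × List Int) × (Int × List Int)) :=
  l.filterMap (fun pc => (keyO idx pc.2).map (fun k => (k, pc)))

theorem bInsert_fold_split (idx : Int) (l : List (Int × List Int))
    (d : PySem.Dict (Int × List Int × List Int) (List (Int × List Int)))
    (acc : List (Int × List Int)) :
    l.foldl (bInsert idx) (d, acc) =
      ((Pof idx l).foldl (fun d p => d.modify p.1 [] (· ++ [p.2])) d,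
        acc ++ inertB idx l) := by
  induction l generalizing d acc with
  | nil => simp [Pof, inertB]
  | cons pc t ih =>
      simp only [List.foldl_cons]
      by_cases hc : -(pc.2.length : Int) ≤ idx ∧ idx < (pc.2.length : Int)
      · have hk : keyO idx pc.2 = some (bKey pc.2 idx) := by
          unfold keyO; rw [if_pos hc]
        have hb : bInsert idx (d, acc) pc =
            (d.modify (bKey pc.2 idx) [] (· ++ [pc]), acc) := by
          simp only [bInsert]
          rw [if_pos hc]
        rw [hb, ih]
        have hP : Pof idx (pc :: t) = (bKey pc.2 idx, pc) :: Pof idx t := by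
          unfold Pof
          rw [List.filterMap_cons, hk]
          rfl
        have hI : inertB idx (pc :: t) = inertB idx t := by
          unfold inertB
          rw [List.filter_cons, if_neg (by simp [hk])]
        rw [hP, hI]
        simp only [List.foldl_cons]
      · have hk : keyO idx pc.2 = none := by
          unfold keyO; rw [if_neg hc]
        have hb : bInsert idx (d, acc) pc = (d, acc ++ [pc]) := by
          simp only [bInsert]
          rw [if_neg hc]
        rw [hb, ih]
        have hP : Pof idx (pc :: t) = Pof idx t := by
          unfold Pof
          rw [List.filterMap_cons, hk]
          rfl
        have hI : inertB idx (pc :: t) = pc :: inertB idx t := by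
          unfold inertB
          rw [List.filter_cons, if_pos (by simp [hk])]
        rw [hP, hI]
        simp

theorem Pof_map_fst (idx : Int) (l : List (Int × List Int)) :
    (Pof idx l).map Prod.fst = l.filterMap (fun pc => keyO idx pc.2) := by
  induction l with
  | nil => rfl
  | cons pc t ih =>
      unfold Pof at *
      rw [List.filterMap_cons, List.filterMap_cons]
      cases hk : keyO idx pc.2 with
      | none => simpa using ih
      | some k => simp only [Option.map_some, List.map_cons]; rw [ih]

theorem Pof_filter_snd (idx : Int) (l : List (Int × List Int))
    (k : Int × List Int × List Int) :
    ((Pof idx l).filter (fun p => p.1 == k)).map (·.2) = filterB idx l k := by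
  induction l with
  | nil => rfl
  | cons pc t ih =>
      unfold Pof filterB at *
      rw [List.filterMap_cons, List.filter_cons]
      cases hk : keyO idx pc.2 with
      | none =>
          rw [if_neg (by simp [hk])]
          exact ih
      | some k0 =>
          simp only [Option.map_some]
          rw [List.filter_cons]
          by_cases hkk : k0 = k
          · subst hkk
            rw [if_pos (by simp), if_pos (by simp [hk])]
            simp only [List.map_cons]
            rw [ih]
          · rw [if_neg (by simp [hkk]), if_neg (by simp [hk, hkk])]
            exact ih

theorem filterB_reverse (idx : Int) (L : List (Int × List Int)) (k : Int × List Int × List Int) :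
    filterB idx L.reverse k = (filterB idx L k).reverse := by
  unfold filterB
  exact List.filter_reverse

theorem inertB_reverse (idx : Int) (L : List (Int × List Int)) :
    inertB idx L.reverse = (inertB idx L).reverse := by
  unfold inertB
  exact List.filter_reverse

theorem alt_eq_sorted (cases : List (List Int)) (idx : Int) :
    factorize_cases_alt cases idx =
      (PySem.List.sorted
        (inertB idx (PySem.List.enumerate cases 0) ++
          gFlat idx (keysetB idx (PySem.List.enumerate cases 0))
            ((PySem.List.enumerate cases 0).reverse))
        (fun r => r.1) true).map (fun r => r.2) := by
  unfold factorize_cases_alt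
  dsimp only
  set L := PySem.List.enumerate cases 0 with hL
  rw [bInsert_fold_split idx L PySem.Dict.empty []]
  simp only [List.nil_append]
  set groups := (Pof idx L).foldl (fun d p => d.modify p.1 [] (· ++ [p.2]))
    (PySem.Dict.empty : PySem.Dict (Int × List Int × List Int) (List (Int × List Int))) with hg
  have hkeys : groups.keys = keysetB idx L := by
    rw [hg]
    have := PySem.Dict.keys_foldl_modify_key (Pof idx L) Prod.fst []
      (fun _ p => (· ++ [p.2]))
      (PySem.Dict.empty : PySem.Dict (Int × List Int × List Int) (List (Int × List Int)))
    rw [this, Pof_map_fst]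
    rfl
  have hnodup : groups.keys.Nodup := by
    rw [hg]
    exact PySem.Dict.nodup_keys_foldl_modify_key (Pof idx L) Prod.fst []
      (fun _ p => (· ++ [p.2])) PySem.Dict.empty (by simp)
  have hgetD : ∀ k, groups.getD k [] = filterB idx L k := by
    intro k
    rw [hg, PySem.Dict.getD_foldl_modify_append]
    simp only [PySem.Dict.getD_empty, List.nil_append]
    exact Pof_filter_snd idx L k
  have hitems : groups.items = (keysetB idx L).map (fun k => (k, filterB idx L k)) := by
    rw [PySem.Dict.items_eq_map_keys groups hnodup []]
    rw [hkeys]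
    apply List.map_congr_left
    intro k _
    rw [hgetD]
  rw [hitems]
  rw [PySem.List.foldl_append_eq_flatMap (fun kv => bRound idx kv.2)
    ((keysetB idx L).map (fun k => (k, filterB idx L k))) (inertB idx L)]
  have hb : ∀ k, bRound idx (filterB idx L k) = bGroup idx (filterB idx L.reverse k) := by
    intro k
    unfold bGroup
    rw [filterB_reverse, List.reverse_reverse]
  have hfm : (((keysetB idx L).map (fun k => (k, filterB idx L k))).flatMap
      (fun kv => bRound idx kv.2)) = gFlat idx (keysetB idx L) L.reverse := by
    rw [List.flatMap_map]
    unfold gFlat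
    refine List.flatMap_congr ?_
    intro k _
    exact hb k
  rw [hfm]

-- ---------- the value scan of one combining round ----------

-- running sum and the sequence of merged values, over the scanned values
def sT : List Int → Int → Int × List Int
  | [], s => (s, [])
  | v :: vs, s =>
      if v = s then sT vs s
      else ((sT vs (s + v)).1, v :: (sT vs (s + v)).2)

theorem sT_cons (v : Int) (vs : List Int) (s : Int) :
    sT (v :: vs) s =
      if v = s then sT vs s else ((sT vs (s + v)).1, v :: (sT vs (s + v)).2) := rfl

-- ---------- B's per-bucket loop in pop-order coordinates ----------

def vStep (idx : Int) (st : List Int × List (Int × List Int)) (qc : Int × List Int) :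
    List Int × List (Int × List Int) :=
  if PySem.List.pyGetD qc.2 idx 0 != PySem.List.pyGetD st.1 idx 0 then
    (bRebuild idx st.1 qc.2, removeLastSnd st.2 qc.2)
  else st

theorem bFold_eq_vFold (idx : Int) (u : List (Int × List Int)) :
    ∀ (a : List Int) (X : List (Int × List Int)),
      u.foldl (bStep idx) (a, X.reverse) =
        ((u.foldl (vStep idx) (a, X)).1, (u.foldl (vStep idx) (a, X)).2.reverse) := by
  induction u with
  | nil => intro a X; simp
  | cons e t ih =>
      intro a X
      simp only [List.foldl_cons]
      unfold bStep vStep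
      by_cases h : (PySem.List.pyGetD e.2 idx 0 != PySem.List.pyGetD a idx 0) = true
      · rw [if_pos h, if_pos h]
        simp only
        have hrv : bDelFirst X.reverse e.2 = (removeLastSnd X e.2).reverse := by
          unfold removeLastSnd
          rw [List.reverse_reverse]
        rw [hrv]
        exact ih _ _
      · rw [if_neg h, if_neg h]
        exact ih _ _

theorem bRound_nil (idx : Int) : bRound idx [] = [] := by
  rw [bRound]

theorem bRound_ne (idx : Int) (ms : List (Int × List Int)) (h : ms ≠ []) :
    bRound idx ms =
      ((ms.getLast h).1,
        (ms.dropLast.reverse.foldl (bStep idx) ((ms.getLast h).2, ms.dropLast)).1) ::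
      bRound idx (ms.dropLast.reverse.foldl (bStep idx) ((ms.getLast h).2, ms.dropLast)).2 := by
  match ms with
  | a :: t => rw [bRound]

theorem bRound_rev_cons (idx : Int) (m : Int × List Int) (T : List (Int × List Int)) :
    bRound idx ((m :: T).reverse) =
      (m.1, (T.foldl (vStep idx) (m.2, T)).1) ::
        bRound idx (((T.foldl (vStep idx) (m.2, T)).2).reverse) := by
  have hne : (m :: T).reverse ≠ [] := by simp
  rw [bRound_ne idx _ hne]
  have hrc : (m :: T).reverse = T.reverse ++ [m] := by simp
  have hlast : ((m :: T).reverse).getLast hne = m := by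
    rw [List.getLast_eq_head_reverse]
    simp
  have hdrop : ((m :: T).reverse).dropLast = T.reverse := by
    rw [hrc, List.dropLast_concat]
  rw [hlast, hdrop, List.reverse_reverse]
  rw [bFold_eq_vFold idx T m.2 T]

-- ---------- positions: raw Python slices as take/drop at a fixed position ----------

def natPos (idx : Int) (l : Nat) : Nat := if 0 ≤ idx then idx.toNat else l - (-idx).toNat

-- at every list of length l, the three raw Python accesses are take/drop/getD at P
def SliceAt (idx : Int) (l P : Nat) : Prop :=
  P < l ∧ idx < (l : Int) ∧ ∀ e : List Int, e.length = l →
    PySem.List.slice e none (some idx) = e.take P ∧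
    PySem.List.slice e (some (idx + 1)) none = e.drop (P + 1) ∧
    PySem.List.pyGetD e idx 0 = e.getD P 0

theorem sliceAt_of_good (idx : Int) (l : Nat)
    (hgood : -(l : Int) ≤ idx ∧ idx < (l : Int)) (hne : idx ≠ -1) :
    SliceAt idx l (natPos idx l) := by
  by_cases h0 : 0 ≤ idx
  · have hP : natPos idx l = idx.toNat := by unfold natPos; rw [if_pos h0]
    refine ⟨by rw [hP]; omega, by omega, ?_⟩
    · intro e he
      refine ⟨?_, ?_, ?_⟩
      · rw [PySem.List.slice_to e h0, hP]
      · rw [PySem.List.slice_from e (by omega), hP]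
        congr 1
        omega
      · rw [PySem.List.pyGetD_eq_getElem e 0 h0 (by omega), hP,
          List.getD_eq_getElem e 0 (by omega)]
  · have hk0 : ¬ (0 ≤ idx) := h0
    set k := (-idx).toNat with hk
    have hkidx : idx = -(k : Int) := by omega
    have hk2 : 2 ≤ k := by omega
    have hkl : k ≤ l := by omega
    have hP : natPos idx l = l - k := by unfold natPos; rw [if_neg hk0]
    refine ⟨by rw [hP]; omega, by omega, ?_⟩
    · intro e he
      refine ⟨?_, ?_, ?_⟩
      · rw [hP, hkidx, PySem.List.slice_to_neg_natCast e k (by omega), he]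
      · rw [hP]
        have h2 : idx + 1 = -((k - 1 : Nat) : Int) := by omega
        rw [h2, PySem.List.slice_from_neg_natCast e (k - 1) (by omega), he]
        congr 1
        omega
      · rw [hP, hkidx, PySem.List.pyGetD_neg_natCast e k 0 (by omega) (by omega),
          List.getD_eq_getElem e 0 (by omega)]
        congr 1
        omega

-- the canonical member of the bucket with prefix pre and suffix suf
def mkCase (pre suf : List Int) (v : Int) : List Int := pre ++ v :: suf

theorem mkCase_length (pre suf : List Int) (v : Int) :
    (mkCase pre suf v).length = pre.length + 1 + suf.length := by
  simp [mkCase]; omega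

theorem mkCase_take (pre suf : List Int) (v : Int) :
    (mkCase pre suf v).take pre.length = pre := by
  unfold mkCase
  exact List.take_left

theorem mkCase_drop (pre suf : List Int) (v : Int) :
    (mkCase pre suf v).drop (pre.length + 1) = suf := by
  unfold mkCase
  have h : pre ++ v :: suf = (pre ++ [v]) ++ suf := by simp
  rw [h]
  have h2 : pre.length + 1 = (pre ++ [v]).length := by simp
  rw [h2]
  exact List.drop_left

theorem mkCase_getD (pre suf : List Int) (v : Int) :
    (mkCase pre suf v).getD pre.length 0 = v := by
  unfold mkCase
  rw [List.getD_eq_getElem?_getD, List.getElem?_append_right (le_refl _)]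
  simp

theorem reconstruct (e : List Int) (P : Nat) (hP : P < e.length) :
    e = e.take P ++ e.getD P 0 :: e.drop (P + 1) := by
  conv_lhs => rw [← List.take_append_drop (P + 1) e]
  rw [List.take_succ]
  have h : e[P]? = some e[P] := List.getElem?_eq_getElem hP
  rw [h, List.getD_eq_getElem e 0 hP]
  simp

-- context for one bucket: key ((l:Int), pre, suf), raw slices at position P = pre.length
def GroupCtx (idx : Int) (l : Nat) (pre suf : List Int) : Prop :=
  SliceAt idx l pre.length ∧ l = pre.length + 1 + suf.length ∧ -(l : Int) ≤ idx

theorem len_of_keyO (idx : Int) (c : List Int) (n : Int) (pre suf : List Int)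
    (h : keyO idx c = some (n, pre, suf)) : (c.length : Int) = n := by
  unfold keyO at h
  split at h
  · unfold bKey at h
    injection h with h
    exact congrArg (·.1) h
  · exact absurd h (by simp)

theorem keyO_some_iff (idx : Int) (l : Nat) (pre suf : List Int)
    (hctx : GroupCtx idx l pre suf) (e : List Int) :
    keyO idx e = some ((l : Int), pre, suf) ↔ e = mkCase pre suf (e.getD pre.length 0) := by
  obtain ⟨⟨hPl, hIl, hS⟩, hlen, hIdx⟩ := hctx
  constructor
  · intro h
    have he : e.length = l := by
      have := len_of_keyO idx e _ _ _ h
      exact_mod_cast this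
    rcases hS e he with ⟨hs1, hs2, _⟩
    unfold keyO at h
    rw [if_pos (by rw [he]; exact ⟨hIdx, hIl⟩)] at h
    injection h with h
    have h2 : PySem.List.slice e none (some idx) = pre := by
      have := congrArg (·.2.1) h
      simpa [bKey] using this
    have h3 : PySem.List.slice e (some (idx + 1)) none = suf := by
      have := congrArg (·.2.2) h
      simpa [bKey] using this
    have hT : e.take pre.length = pre := by rw [← hs1]; exact h2
    have hD : e.drop (pre.length + 1) = suf := by rw [← hs2]; exact h3
    have hrec := reconstruct e pre.length (by omega)
    unfold mkCase
    conv_lhs => rw [hrec]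
    rw [hT, hD]
  · intro h
    have he : e.length = l := by
      rw [h, mkCase_length]
      omega
    rcases hS e he with ⟨hs1, hs2, _⟩
    unfold keyO
    rw [if_pos (by rw [he]; exact ⟨hIdx, hIl⟩)]
    unfold bKey
    rw [hs1, hs2, he]
    have hT : e.take pre.length = pre := by
      conv_lhs => rw [h]
      exact mkCase_take pre suf _
    have hD : e.drop (pre.length + 1) = suf := by
      conv_lhs => rw [h]
      exact mkCase_drop pre suf _
    rw [hT, hD]

theorem key_mkCase (idx : Int) (l : Nat) (pre suf : List Int)
    (hctx : GroupCtx idx l pre suf) (v : Int) :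
    keyO idx (mkCase pre suf v) = some ((l : Int), pre, suf) := by
  rw [keyO_some_iff idx l pre suf hctx, mkCase_getD]

theorem rawval_of_key (idx : Int) (l : Nat) (pre suf : List Int)
    (hctx : GroupCtx idx l pre suf) (e : List Int)
    (h : keyO idx e = some ((l : Int), pre, suf)) :
    PySem.List.pyGetD e idx 0 = e.getD pre.length 0 := by
  have he : e.length = l := by
    have := len_of_keyO idx e _ _ _ h
    exact_mod_cast this
  exact (hctx.1.2.2 e he).2.2

-- the inner-loop condition of A, at a state case of the canonical form
theorem cond_iff (idx : Int) (l : Nat) (pre suf : List Int)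
    (hctx : GroupCtx idx l pre suf) (s : Int) (fc : List Int) :
    fcCond idx (mkCase pre suf s) fc = true ↔
      (keyO idx fc = some ((l : Int), pre, suf) ∧ fc.getD pre.length 0 ≠ s) := by
  have hmk : keyO idx (mkCase pre suf s) = some ((l : Int), pre, suf) :=
    key_mkCase idx l pre suf hctx s
  have hmlen : (mkCase pre suf s).length = l := by
    rw [mkCase_length]
    have := hctx.2.1
    omega
  obtain ⟨⟨hPl, hidxl, hS⟩, hlen, hIdx⟩ := hctx
  rcases hS (mkCase pre suf s) hmlen with ⟨hm1, hm2, hm3⟩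
  have hmT : (mkCase pre suf s).take pre.length = pre := mkCase_take pre suf s
  have hmD : (mkCase pre suf s).drop (pre.length + 1) = suf := mkCase_drop pre suf s
  have hmV : (mkCase pre suf s).getD pre.length 0 = s := mkCase_getD pre suf s
  unfold fcCond
  simp only [Bool.and_eq_true, decide_eq_true_eq, bne_iff_ne, ne_eq, beq_iff_eq]
  constructor
  · rintro ⟨⟨⟨⟨hc1, hc2⟩, hc3⟩, hc4⟩, hc5⟩
    have hfl : fc.length = l := by
      rw [hmlen] at hc2
      exact_mod_cast hc2.symm
    rcases hS fc hfl with ⟨hf1, hf2, hf3⟩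
    constructor
    · rw [hm1, hmT, hf1] at hc4
      rw [hm2, hmD, hf2] at hc5
      rw [keyO_some_iff idx l pre suf ⟨⟨hPl, hidxl, hS⟩, hlen, hIdx⟩ fc]
      unfold mkCase
      conv_lhs => rw [reconstruct fc pre.length (by omega)]
      rw [← hc4, ← hc5]
    · rw [hm3, hmV] at hc3
      rw [hf3] at hc3
      exact fun hh => hc3 (by rw [hh])
  · rintro ⟨hk, hv⟩
    have hfl : fc.length = l := by
      have := len_of_keyO idx fc _ _ _ hk
      exact_mod_cast this
    rcases hS fc hfl with ⟨hf1, hf2, hf3⟩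
    have hfc : fc = mkCase pre suf (fc.getD pre.length 0) :=
      (keyO_some_iff idx l pre suf ⟨⟨hPl, hidxl, hS⟩, hlen, hIdx⟩ fc).mp hk
    have hfT : fc.take pre.length = pre := by
      conv_lhs => rw [hfc]
      exact mkCase_take pre suf _
    have hfD : fc.drop (pre.length + 1) = suf := by
      conv_lhs => rw [hfc]
      exact mkCase_drop pre suf _
    refine ⟨⟨⟨⟨?_, ?_⟩, ?_⟩, ?_⟩, ?_⟩
    · rw [hmlen]; exact hidxl
    · rw [hmlen, hfl]
    · rw [hm3, hmV, hf3]
      exact fun hh => hv (by rw [hh])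
    · rw [hm1, hmT, hf1, hfT]
    · rw [hm2, hmD, hf2, hfD]

-- A's rebuild and B's rebuild are the same expression
theorem bRebuild_eq_fcRebuild (idx : Int) (a b : List Int) :
    bRebuild idx a b = fcRebuild idx a b := rfl

theorem rebuild_eq (idx : Int) (l : Nat) (pre suf : List Int)
    (hctx : GroupCtx idx l pre suf) (s : Int) (fc : List Int)
    (hk : keyO idx fc = some ((l : Int), pre, suf)) :
    fcRebuild idx (mkCase pre suf s) fc = mkCase pre suf (s + fc.getD pre.length 0) := by
  have hmlen : (mkCase pre suf s).length = l := by
    rw [mkCase_length]; exact hctx.2.1.symm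
  have hfv := rawval_of_key idx l pre suf hctx fc hk
  obtain ⟨⟨hPl, hIl, hS⟩, hlen, hIdx⟩ := hctx
  rcases hS (mkCase pre suf s) hmlen with ⟨hm1, hm2, hm3⟩
  unfold fcRebuild
  rw [hm1, hm2, hm3, mkCase_take, mkCase_drop, mkCase_getD, hfv]
  simp [mkCase]

-- ---------- A's sweep over one pop-order pool, in canonical-form coordinates ----------

-- values at position P of the members of bucket K0, in scan order
def valsG (idx : Int) (P : Nat) (K0 : Int × List Int × List Int)
    (u : List (Int × List Int)) : List Int :=
  (filterB idx u K0).map (fun pc => pc.2.getD P 0)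

theorem pStep_eq_of_true (idx : Int) (a : List Int) (R : List (Int × List Int))
    (fc : Int × List Int) (h : fcCond idx a fc.2 = true) :
    pStep idx (a, R) fc = (fcRebuild idx a fc.2, removeLastSnd R fc.2) := by
  unfold pStep
  rw [h]
  simp

theorem pStep_eq_of_false (idx : Int) (a : List Int) (R : List (Int × List Int))
    (fc : Int × List Int) (h : fcCond idx a fc.2 = false) :
    pStep idx (a, R) fc = (a, R) := by
  unfold pStep
  rw [h]
  simp

theorem sweep_char (idx : Int) (l : Nat) (pre suf : List Int)
    (hctx : GroupCtx idx l pre suf) :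
    ∀ (u : List (Int × List Int)) (s : Int) (R : List (Int × List Int)),
      u.foldl (pStep idx) (mkCase pre suf s, R) =
        (mkCase pre suf (sT (valsG idx pre.length ((l : Int), pre, suf) u) s).1,
          ((sT (valsG idx pre.length ((l : Int), pre, suf) u) s).2).foldl
            (fun R v => removeLastSnd R (mkCase pre suf v)) R) := by
  intro u
  induction u with
  | nil => intro s R; simp [valsG, filterB, sT]
  | cons e t ih =>
      intro s R
      by_cases hk : keyO idx e.2 = some ((l : Int), pre, suf)
      · have hvals : valsG idx pre.length ((l : Int), pre, suf) (e :: t) =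
            e.2.getD pre.length 0 :: valsG idx pre.length ((l : Int), pre, suf) t := by
          unfold valsG filterB
          rw [List.filter_cons, if_pos (by simp [hk])]
          simp
        by_cases hv : e.2.getD pre.length 0 = s
        · have hcond : fcCond idx (mkCase pre suf s) e.2 = false := by
            rw [Bool.eq_false_iff]
            intro hc
            exact ((cond_iff idx l pre suf hctx s e.2).mp hc).2 hv
          simp only [List.foldl_cons]
          rw [pStep_eq_of_false idx _ R e hcond, hvals, sT_cons, if_pos hv]
          exact ih s R
        · have hcond : fcCond idx (mkCase pre suf s) e.2 = true :=
            (cond_iff idx l pre suf hctx s e.2).mpr ⟨hk, hv⟩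
          have he2 : e.2 = mkCase pre suf (e.2.getD pre.length 0) :=
            (keyO_some_iff idx l pre suf hctx e.2).mp hk
          have hrw : removeLastSnd R e.2 =
              removeLastSnd R (mkCase pre suf (e.2.getD pre.length 0)) := by
            conv_lhs => rw [he2]
          simp only [List.foldl_cons]
          rw [pStep_eq_of_true idx _ R e hcond, rebuild_eq idx l pre suf hctx s e.2 hk,
            hrw, hvals, sT_cons, if_neg hv]
          simp only [List.foldl_cons]
          exact ih (s + e.2.getD pre.length 0) _
      · have hvals : valsG idx pre.length ((l : Int), pre, suf) (e :: t) =
            valsG idx pre.length ((l : Int), pre, suf) t := by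
          unfold valsG filterB
          rw [List.filter_cons, if_neg (by simp [hk])]
        have hcond : fcCond idx (mkCase pre suf s) e.2 = false := by
          rw [Bool.eq_false_iff]
          intro hc
          exact hk ((cond_iff idx l pre suf hctx s e.2).mp hc).1
        simp only [List.foldl_cons]
        rw [pStep_eq_of_false idx _ R e hcond, hvals]
        exact ih s R

-- ---------- B's sweep over one bucket, in the same coordinates ----------

theorem bSweep_char (idx : Int) (l : Nat) (pre suf : List Int)
    (hctx : GroupCtx idx l pre suf) :
    ∀ (u : List (Int × List Int)) (s : Int) (R : List (Int × List Int)),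
      (∀ x ∈ u, keyO idx x.2 = some ((l : Int), pre, suf)) →
      u.foldl (vStep idx) (mkCase pre suf s, R) =
        (mkCase pre suf (sT (u.map (fun pc => pc.2.getD pre.length 0)) s).1,
          ((sT (u.map (fun pc => pc.2.getD pre.length 0)) s).2).foldl
            (fun R v => removeLastSnd R (mkCase pre suf v)) R) := by
  intro u
  induction u with
  | nil => intro s R _; simp [sT]
  | cons e t ih =>
      intro s R hall
      have hk : keyO idx e.2 = some ((l : Int), pre, suf) := hall e (by simp)
      have hvw : PySem.List.pyGetD e.2 idx 0 = e.2.getD pre.length 0 :=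
        rawval_of_key idx l pre suf hctx e.2 hk
      have hsw : PySem.List.pyGetD (mkCase pre suf s) idx 0 = s := by
        have hmlen : (mkCase pre suf s).length = l := by
          rw [mkCase_length]
          have := hctx.2.1
          omega
        rw [(hctx.1.2.2 (mkCase pre suf s) hmlen).2.2, mkCase_getD]
      have ht : ∀ x ∈ t, keyO idx x.2 = some ((l : Int), pre, suf) :=
        fun x hx => hall x (by simp [hx])
      simp only [List.foldl_cons, List.map_cons]
      by_cases hv : e.2.getD pre.length 0 = s
      · have hcond : (PySem.List.pyGetD e.2 idx 0 != PySem.List.pyGetD (mkCase pre suf s) idx 0)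
            = false := by
          rw [hvw, hsw]
          simp only [bne_eq_false_iff_eq]
          exact hv
        unfold vStep
        rw [hcond]
        simp only [Bool.false_eq_true, if_false]
        rw [sT_cons, if_pos hv]
        exact ih s R ht
      · have hcond : (PySem.List.pyGetD e.2 idx 0 != PySem.List.pyGetD (mkCase pre suf s) idx 0)
            = true := by
          rw [hvw, hsw]
          simp only [bne_iff_ne, ne_eq]
          exact hv
        unfold vStep
        rw [hcond]
        simp only [if_true]
        have he2 : e.2 = mkCase pre suf (e.2.getD pre.length 0) :=
          (keyO_some_iff idx l pre suf hctx e.2).mp hk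
        have hrb : bRebuild idx (mkCase pre suf s) e.2 =
            mkCase pre suf (s + e.2.getD pre.length 0) := by
          rw [bRebuild_eq_fcRebuild]
          exact rebuild_eq idx l pre suf hctx s e.2 hk
        have hrw : removeLastSnd R e.2 =
            removeLastSnd R (mkCase pre suf (e.2.getD pre.length 0)) := by
          conv_lhs => rw [he2]
        rw [hrb, hrw, sT_cons, if_neg hv]
        simp only [List.foldl_cons]
        exact ih (s + e.2.getD pre.length 0) _ ht

-- ---------- removals only touch their own bucket ----------

theorem filterB_bDelFirst_ne (idx : Int) (K0 k : Int × List Int × List Int)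
    (hkk : k ≠ K0) (w : List Int) (hw : keyO idx w = some K0) :
    ∀ L, filterB idx (bDelFirst L w) k = filterB idx L k := by
  intro L
  induction L with
  | nil => rfl
  | cons x t ih =>
      rw [bDelFirst_cons]
      by_cases hx : x.2 = w
      · rw [if_pos hx]
        unfold filterB
        rw [List.filter_cons, if_neg (by
          simp [hx, hw]
          exact fun h => hkk h.symm)]
      · rw [if_neg hx]
        unfold filterB
        rw [List.filter_cons, List.filter_cons]
        by_cases hkey : (keyO idx x.2 == some k) = true
        · rw [if_pos hkey, if_pos hkey]
          rw [show List.filter (fun pc => keyO idx pc.2 == some k) (bDelFirst t w) =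
            filterB idx (bDelFirst t w) k from rfl, ih]
          rfl
        · rw [if_neg hkey, if_neg hkey]
          exact ih

theorem filterB_removeLastSnd_ne (idx : Int) (K0 k : Int × List Int × List Int)
    (hkk : k ≠ K0) (w : List Int) (hw : keyO idx w = some K0) (L : List (Int × List Int)) :
    filterB idx (removeLastSnd L w) k = filterB idx L k := by
  unfold removeLastSnd
  rw [filterB_reverse, filterB_bDelFirst_ne idx K0 k hkk w hw, ← filterB_reverse,
    List.reverse_reverse]

theorem filterB_bDelFirst_self (idx : Int) (K0 : Int × List Int × List Int)
    (w : List Int) (hw : keyO idx w = some K0) :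
    ∀ L, filterB idx (bDelFirst L w) K0 = bDelFirst (filterB idx L K0) w := by
  intro L
  induction L with
  | nil => rfl
  | cons x t ih =>
      by_cases hx : x.2 = w
      · rw [show bDelFirst (x :: t) w = t from by rw [bDelFirst_cons, if_pos hx]]
        unfold filterB
        rw [List.filter_cons, if_pos (by simp [hx, hw])]
        rw [show bDelFirst (x :: List.filter (fun pc => keyO idx pc.2 == some K0) t) w =
          List.filter (fun pc => keyO idx pc.2 == some K0) t from by
            rw [bDelFirst_cons, if_pos hx]]
      · rw [show bDelFirst (x :: t) w = x :: bDelFirst t w from by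
          rw [bDelFirst_cons, if_neg hx]]
        unfold filterB
        rw [List.filter_cons, List.filter_cons]
        by_cases hkey : (keyO idx x.2 == some K0) = true
        · rw [if_pos hkey, if_pos hkey]
          rw [show bDelFirst (x :: List.filter (fun pc => keyO idx pc.2 == some K0) t) w =
            x :: bDelFirst (List.filter (fun pc => keyO idx pc.2 == some K0) t) w from by
              rw [bDelFirst_cons, if_neg hx]]
          rw [show List.filter (fun pc => keyO idx pc.2 == some K0) (bDelFirst t w) =
            filterB idx (bDelFirst t w) K0 from rfl, ih]
          rfl
        · rw [if_neg hkey, if_neg hkey]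
          exact ih

theorem filterB_removeLastSnd_self (idx : Int) (K0 : Int × List Int × List Int)
    (w : List Int) (hw : keyO idx w = some K0) (L : List (Int × List Int)) :
    filterB idx (removeLastSnd L w) K0 = removeLastSnd (filterB idx L K0) w := by
  unfold removeLastSnd
  rw [filterB_reverse, filterB_bDelFirst_self idx K0 w hw, filterB_reverse]

theorem inertB_bDelFirst (idx : Int) (K0 : Int × List Int × List Int)
    (w : List Int) (hw : keyO idx w = some K0) :
    ∀ L, inertB idx (bDelFirst L w) = inertB idx L := by
  intro L
  induction L with
  | nil => rfl
  | cons x t ih =>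
      rw [bDelFirst_cons]
      by_cases hx : x.2 = w
      · rw [if_pos hx]
        unfold inertB
        rw [List.filter_cons, if_neg (by simp [hx, hw])]
      · rw [if_neg hx]
        unfold inertB
        rw [List.filter_cons, List.filter_cons]
        by_cases hkey : (keyO idx x.2 == (none : Option (Int × List Int × List Int))) = true
        · rw [if_pos hkey, if_pos hkey]
          rw [show List.filter (fun pc => keyO idx pc.2 == none) (bDelFirst t w) =
            inertB idx (bDelFirst t w) from rfl, ih]
          rfl
        · rw [if_neg hkey, if_neg hkey]
          exact ih

theorem inertB_removeLastSnd (idx : Int) (K0 : Int × List Int × List Int)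
    (w : List Int) (hw : keyO idx w = some K0) (L : List (Int × List Int)) :
    inertB idx (removeLastSnd L w) = inertB idx L := by
  unfold removeLastSnd
  rw [inertB_reverse, inertB_bDelFirst idx K0 w hw, ← inertB_reverse,
    List.reverse_reverse]

theorem filterB_fold_ne (idx : Int) (l : Nat) (pre suf : List Int)
    (hctx : GroupCtx idx l pre suf) (k : Int × List Int × List Int)
    (hkk : k ≠ ((l : Int), pre, suf)) (ts : List Int) :
    ∀ R, filterB idx (ts.foldl (fun R v => removeLastSnd R (mkCase pre suf v)) R) k =
      filterB idx R k := by
  induction ts with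
  | nil => intro R; rfl
  | cons v t ih =>
      intro R
      simp only [List.foldl_cons]
      rw [ih, filterB_removeLastSnd_ne idx ((l : Int), pre, suf) k hkk _
        (key_mkCase idx l pre suf hctx v)]

theorem filterB_fold_self (idx : Int) (l : Nat) (pre suf : List Int)
    (hctx : GroupCtx idx l pre suf) (ts : List Int) :
    ∀ R, filterB idx (ts.foldl (fun R v => removeLastSnd R (mkCase pre suf v)) R)
        ((l : Int), pre, suf) =
      ts.foldl (fun G v => removeLastSnd G (mkCase pre suf v))
        (filterB idx R ((l : Int), pre, suf)) := by
  induction ts with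
  | nil => intro R; rfl
  | cons v t ih =>
      intro R
      simp only [List.foldl_cons]
      rw [ih, filterB_removeLastSnd_self idx ((l : Int), pre, suf) _
        (key_mkCase idx l pre suf hctx v)]

theorem inertB_fold (idx : Int) (l : Nat) (pre suf : List Int)
    (hctx : GroupCtx idx l pre suf) (ts : List Int) :
    ∀ R, inertB idx (ts.foldl (fun R v => removeLastSnd R (mkCase pre suf v)) R) =
      inertB idx R := by
  induction ts with
  | nil => intro R; rfl
  | cons v t ih =>
      intro R
      simp only [List.foldl_cons]
      rw [ih, inertB_removeLastSnd idx ((l : Int), pre, suf) _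
        (key_mkCase idx l pre suf hctx v)]

-- ---------- the bucket loop of B computes the same per-round data ----------

theorem bGroup_step (idx : Int) (l : Nat) (pre suf : List Int)
    (hctx : GroupCtx idx l pre suf) (p : Int) (c : List Int) (rest : List (Int × List Int))
    (hkc : keyO idx c = some ((l : Int), pre, suf)) :
    bGroup idx (filterB idx ((p, c) :: rest) ((l : Int), pre, suf)) =
      (p, mkCase pre suf
        (sT (valsG idx pre.length ((l : Int), pre, suf) rest) (c.getD pre.length 0)).1) ::
      bGroup idx
        (filterB idx
          (((sT (valsG idx pre.length ((l : Int), pre, suf) rest) (c.getD pre.length 0)).2).foldl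
            (fun R v => removeLastSnd R (mkCase pre suf v)) rest)
          ((l : Int), pre, suf)) := by
  set K0 : Int × List Int × List Int := ((l : Int), pre, suf) with hK0
  set v0 := c.getD pre.length 0 with hv0
  set G' := filterB idx rest K0 with hG'
  have hmemkey : ∀ pc ∈ G', keyO idx pc.2 = some K0 := by
    intro pc hpc
    have := List.of_mem_filter hpc
    simpa using this
  have hA : filterB idx ((p, c) :: rest) K0 = (p, c) :: G' := by
    unfold filterB
    rw [List.filter_cons, if_pos (by simp [hkc, hK0])]
    rfl
  have hceq : c = mkCase pre suf v0 := (keyO_some_iff idx l pre suf hctx c).mp hkc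
  have hvals : G'.map (fun pc => pc.2.getD pre.length 0) = valsG idx pre.length K0 rest := rfl
  unfold bGroup
  rw [hA, bRound_rev_cons]
  have hsweep : G'.foldl (vStep idx) (c, G') =
      (mkCase pre suf (sT (valsG idx pre.length K0 rest) v0).1,
        ((sT (valsG idx pre.length K0 rest) v0).2).foldl
          (fun R v => removeLastSnd R (mkCase pre suf v)) G') := by
    conv_lhs => rw [hceq]
    rw [bSweep_char idx l pre suf hctx G' v0 G' hmemkey, hvals]
  rw [hsweep]
  congr 1
  have hrest' : filterB idx
      (((sT (valsG idx pre.length K0 rest) v0).2).foldl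
        (fun R v => removeLastSnd R (mkCase pre suf v)) rest) K0 =
      ((sT (valsG idx pre.length K0 rest) v0).2).foldl
        (fun G v => removeLastSnd G (mkCase pre suf v)) G' := by
    rw [filterB_fold_self idx l pre suf hctx _ rest, hG']
  rw [hrest']

-- a bucket whose members are all one same case never combines anything
theorem vFold_id (idx : Int) (a : List Int) :
    ∀ (u : List (Int × List Int)) (R : List (Int × List Int)),
      (∀ e ∈ u, (PySem.List.pyGetD e.2 idx 0 != PySem.List.pyGetD a idx 0) = false) →
      u.foldl (vStep idx) (a, R) = (a, R) := by
  intro u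
  induction u with
  | nil => intro R _; rfl
  | cons e t ih =>
      intro R hall
      simp only [List.foldl_cons]
      unfold vStep
      rw [hall e (by simp)]
      simp only [Bool.false_eq_true, if_false]
      exact ih R (fun x hx => hall x (by simp [hx]))

theorem bGroup_const (idx : Int) (c : List Int) :
    ∀ X : List (Int × List Int), (∀ pc ∈ X, pc.2 = c) → bGroup idx X = X := by
  intro X
  induction X with
  | nil => intro _; unfold bGroup; simp [bRound_nil]
  | cons x T ih =>
      intro hall
      have hx : x.2 = c := hall x (by simp)
      unfold bGroup
      rw [bRound_rev_cons]
      have hfold : T.foldl (vStep idx) (x.2, T) = (x.2, T) := by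
        apply vFold_id
        intro e he
        rw [hall e (List.mem_cons_of_mem x he), hx]
        simp
      rw [hfold]
      have hrec : bRound idx T.reverse = T := ih (fun pc hpc => hall pc (by simp [hpc]))
      rw [hrec]

-- ---------- assembling the buckets ----------

theorem perm_flatMap {α β : Type} (f : α → List β) {l1 l2 : List α} (h : l1.Perm l2) :
    (l1.flatMap f).Perm (l2.flatMap f) := by
  induction h with
  | nil => simp
  | cons x _ ih =>
      simp only [List.flatMap_cons]
      exact ih.append_left (f x)
  | swap x y l =>
      simp only [List.flatMap_cons]
      rw [← List.append_assoc, ← List.append_assoc]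
      exact (List.perm_append_comm).append_right _
  | trans _ _ ih1 ih2 => exact ih1.trans ih2

theorem bGroup_nil (idx : Int) : bGroup idx [] = [] := by
  unfold bGroup
  simp [bRound_nil]

theorem gFlat_cons (idx : Int) (k : Int × List Int × List Int)
    (ks : List (Int × List Int × List Int)) (l : List (Int × List Int)) :
    gFlat idx (k :: ks) l = bGroup idx (filterB idx l k) ++ gFlat idx ks l := by
  simp [gFlat]

theorem gFlat_congr (idx : Int) (ks : List (Int × List Int × List Int))
    (l l' : List (Int × List Int))
    (h : ∀ k ∈ ks, filterB idx l k = filterB idx l' k) :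
    gFlat idx ks l = gFlat idx ks l' := by
  unfold gFlat
  exact List.flatMap_congr (fun k hk => by rw [h k hk])

theorem gFlat_filter_support (idx : Int) (ks : List (Int × List Int × List Int))
    (l : List (Int × List Int)) :
    gFlat idx ks l = gFlat idx (ks.filter (fun k => !(filterB idx l k).isEmpty)) l := by
  induction ks with
  | nil => rfl
  | cons k t ih =>
      rw [gFlat_cons, List.filter_cons]
      by_cases h : (filterB idx l k).isEmpty = true
      · rw [if_neg (by simp [h])]
        rw [List.isEmpty_iff.mp h, bGroup_nil]
        simpa using ih
      · rw [if_pos (by simp [Bool.not_eq_true'] at h ⊢; exact h)]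
        rw [gFlat_cons, ih]

theorem mem_keysetB_iff (idx : Int) (l : List (Int × List Int))
    (k : Int × List Int × List Int) :
    k ∈ keysetB idx l ↔ filterB idx l k ≠ [] := by
  unfold keysetB
  rw [PySem.Set.mem_ofList]
  constructor
  · intro h
    rcases List.mem_filterMap.mp h with ⟨pc, hpc, hk⟩
    intro hnil
    unfold filterB at hnil
    rw [List.filter_eq_nil_iff] at hnil
    exact hnil pc hpc (by simp [hk])
  · intro h
    rcases List.exists_mem_of_ne_nil _ h with ⟨pc, hpc⟩
    have h1 := List.of_mem_filter hpc
    have h2 := List.mem_of_mem_filter hpc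
    exact List.mem_filterMap.mpr ⟨pc, h2, by simpa using h1⟩

theorem gFlat_perm_of_support (idx : Int) (ks ks' : List (Int × List Int × List Int))
    (l : List (Int × List Int)) (h1 : ks.Nodup) (h2 : ks'.Nodup)
    (h : ∀ k, filterB idx l k ≠ [] → (k ∈ ks ↔ k ∈ ks')) :
    (gFlat idx ks l).Perm (gFlat idx ks' l) := by
  rw [gFlat_filter_support idx ks l, gFlat_filter_support idx ks' l]
  unfold gFlat
  apply perm_flatMap
  apply List.perm_of_nodup_nodup_toFinset_eq (h1.filter _) (h2.filter _)
  apply Finset.ext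
  intro k
  simp only [List.mem_toFinset, List.mem_filter, Bool.not_eq_true', ← Bool.not_eq_true,
    List.isEmpty_iff]
  constructor
  · rintro ⟨hk, hne⟩
    exact ⟨(h k hne).mp hk, hne⟩
  · rintro ⟨hk, hne⟩
    exact ⟨(h k hne).mpr hk, hne⟩

theorem nodup_keysetB (idx : Int) (l : List (Int × List Int)) : (keysetB idx l).Nodup :=
  PySem.Set.nodup_ofList _

-- ---------- the two assembly steps of the main induction ----------

theorem assemble_inert (idx : Int) (p : Int) (c : List Int) (rest : List (Int × List Int))
    (HK : keyO idx c = none)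
    (H1 : PProc idx ((p, c) :: rest) = (p, c) :: PProc idx rest)
    (hih : (PProc idx rest).Perm (allB idx (keysetB idx rest) rest)) :
    (PProc idx ((p, c) :: rest)).Perm
      (allB idx (keysetB idx ((p, c) :: rest)) ((p, c) :: rest)) := by
  have hin : inertB idx ((p, c) :: rest) = (p, c) :: inertB idx rest := by
    unfold inertB
    rw [List.filter_cons, if_pos (by simp [HK])]
  have hfl : ∀ k, filterB idx ((p, c) :: rest) k = filterB idx rest k := by
    intro k
    unfold filterB
    rw [List.filter_cons, if_neg (by simp [HK])]
  have hks : keysetB idx ((p, c) :: rest) = keysetB idx rest := by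
    unfold keysetB
    rw [List.filterMap_cons]
    simp only [HK]
  have hall : allB idx (keysetB idx ((p, c) :: rest)) ((p, c) :: rest) =
      (p, c) :: allB idx (keysetB idx rest) rest := by
    unfold allB
    rw [hin, hks, gFlat_congr idx (keysetB idx rest) ((p, c) :: rest) rest
      (fun k _ => hfl k)]
    rfl
  rw [H1, hall]
  exact hih.cons _

theorem assemble (idx : Int) (p : Int) (c out : List Int)
    (rest rest' : List (Int × List Int)) (K0 : Int × List Int × List Int)
    (hkc : keyO idx c = some K0)
    (H1 : PProc idx ((p, c) :: rest) = (p, out) :: PProc idx rest')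
    (H2 : bGroup idx (filterB idx ((p, c) :: rest) K0) =
      (p, out) :: bGroup idx (filterB idx rest' K0))
    (H3 : ∀ k, k ≠ K0 → filterB idx rest' k = filterB idx rest k)
    (H4 : inertB idx rest' = inertB idx rest)
    (hih : (PProc idx rest').Perm (allB idx (keysetB idx rest') rest')) :
    (PProc idx ((p, c) :: rest)).Perm
      (allB idx (keysetB idx ((p, c) :: rest)) ((p, c) :: rest)) := by
  set l := (p, c) :: rest with hl
  have hK0mem : K0 ∈ keysetB idx l := by
    unfold keysetB
    rw [PySem.Set.mem_ofList]
    exact List.mem_filterMap.mpr ⟨(p, c), by simp [hl], by simpa using hkc⟩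
  have hnodupL : (keysetB idx l).Nodup := nodup_keysetB idx l
  set erased := (keysetB idx l).erase K0 with herased
  have perm1 : (keysetB idx l).Perm (K0 :: erased) := List.perm_cons_erase hK0mem
  have hmem_er : ∀ k ∈ erased, k ≠ K0 := by
    intro k hk
    exact ((hnodupL.mem_erase_iff).mp hk).1
  have hinl : inertB idx l = inertB idx rest := by
    unfold inertB
    rw [hl, List.filter_cons, if_neg (by simp [hkc])]
  have hfl : ∀ k, k ≠ K0 → filterB idx l k = filterB idx rest k := by
    intro k hk
    unfold filterB
    rw [hl, List.filter_cons, if_neg (by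
      simp [hkc]
      exact fun hh => hk hh.symm)]
  have e3 : gFlat idx erased l = gFlat idx erased rest' := by
    apply gFlat_congr
    intro k hk
    rw [hfl k (hmem_er k hk), H3 k (hmem_er k hk)]
  have permA : (allB idx (keysetB idx l) l).Perm (allB idx (K0 :: erased) l) := by
    unfold allB gFlat
    exact (perm_flatMap _ perm1).append_left _
  have hsupport : (gFlat idx (K0 :: erased) rest').Perm (gFlat idx (keysetB idx rest') rest') := by
    apply gFlat_perm_of_support
    · exact List.Nodup.cons (fun hc => (hmem_er K0 hc) rfl) (hnodupL.erase K0)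
    · exact nodup_keysetB idx rest'
    · intro k hne
      rw [mem_keysetB_iff]
      constructor
      · intro _; exact hne
      · intro _
        by_cases hk : k = K0
        · simp [hk]
        · have h1 : filterB idx l k ≠ [] := by
            rw [hfl k hk, ← H3 k hk]
            exact hne
          have h2 : k ∈ keysetB idx l := (mem_keysetB_iff idx l k).mpr h1
          exact perm1.mem_iff.mp h2
  have hchain : allB idx (K0 :: erased) l =
      inertB idx rest ++ ((p, out) :: (bGroup idx (filterB idx rest' K0) ++
        gFlat idx erased rest')) := by
    unfold allB
    rw [hinl, gFlat_cons, e3, H2]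
    rfl
  have hmid : (inertB idx rest ++ ((p, out) :: (bGroup idx (filterB idx rest' K0) ++
      gFlat idx erased rest'))).Perm
      ((p, out) :: (inertB idx rest ++ (bGroup idx (filterB idx rest' K0) ++
        gFlat idx erased rest'))) :=
    List.perm_middle
  have ht : (p, out) :: (inertB idx rest ++ (bGroup idx (filterB idx rest' K0) ++
      gFlat idx erased rest')) = (p, out) :: allB idx (K0 :: erased) rest' := by
    unfold allB
    rw [H4, gFlat_cons]
  have t1 : (PProc idx l).Perm ((p, out) :: allB idx (keysetB idx rest') rest') := by
    rw [hl, H1]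
    exact hih.cons _
  have t2 : (PProc idx l).Perm ((p, out) :: allB idx (K0 :: erased) rest') := by
    refine t1.trans (List.Perm.cons _ ?_)
    unfold allB
    exact (hsupport.symm).append_left _
  have t3 : (PProc idx l).Perm (allB idx (K0 :: erased) l) := by
    refine t2.trans ?_
    rw [← ht] at *
    exact (hchain ▸ hmid).symm
  exact t3.trans permA.symm

-- ---------- the non-combining head conditions ----------

theorem pFold_id (idx : Int) (a : List Int) :
    ∀ (u : List (Int × List Int)) (R : List (Int × List Int)),
      (∀ e ∈ u, fcCond idx a e.2 = false) → u.foldl (pStep idx) (a, R) = (a, R) := by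
  intro u
  induction u with
  | nil => intro R _; rfl
  | cons e t ih =>
      intro R hall
      simp only [List.foldl_cons]
      rw [pStep_eq_of_false idx a R e (hall e (by simp))]
      exact ih R (fun x hx => hall x (by simp [hx]))

theorem fcCond_false_len_le (idx : Int) (case fc : List Int)
    (h : (case.length : Int) ≤ idx) : fcCond idx case fc = false := by
  unfold fcCond
  rw [decide_eq_false (by omega : ¬ idx < (case.length : Int))]
  simp

theorem fcCond_false_len_ne (idx : Int) (case fc : List Int)
    (h : case.length ≠ fc.length) : fcCond idx case fc = false := by
  unfold fcCond
  have : ((case.length : Int) == (fc.length : Int)) = false := by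
    rw [beq_eq_false_iff_ne]
    intro hh
    exact h (by exact_mod_cast hh)
  rw [this]
  simp

theorem slice_zero_none (e : List Int) : PySem.List.slice e (some 0) none = e := by
  rw [PySem.List.slice_zero_start, PySem.List.slice_none_none]

theorem fcCond_false_neg_one (case fc : List Int) : fcCond (-1) case fc = false := by
  rw [Bool.eq_false_iff]
  intro h
  unfold fcCond at h
  simp only [Bool.and_eq_true, decide_eq_true_eq, bne_iff_ne, ne_eq, beq_iff_eq] at h
  rcases h with ⟨⟨⟨⟨_, _⟩, h3⟩, _⟩, h5⟩
  rw [show (-1 : Int) + 1 = 0 from by norm_num, slice_zero_none, slice_zero_none] at h5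
  rw [h5] at h3
  exact h3 rfl

-- at idx = -1 the key contains the whole case, so equal keys mean equal cases
theorem keyO_neg_one_inj (a b : List Int) (k : Int × List Int × List Int)
    (ha : keyO (-1) a = some k) (hb : keyO (-1) b = some k) : a = b := by
  have h : ∀ c : List Int, keyO (-1) c = some k → k.2.2 = c := by
    intro c hc
    unfold keyO at hc
    split at hc
    · unfold bKey at hc
      injection hc with hc
      subst hc
      show PySem.List.slice c (some (-1 + 1)) none = c
      rw [show (-1 : Int) + 1 = 0 from by norm_num, slice_zero_none]
    · exact absurd hc (by simp)
  rw [← h a ha, ← h b hb]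

-- ---------- the main induction ----------

theorem PProc_nil (idx : Int) : PProc idx [] = [] := by rw [PProc]

-- no two distinct cases of equal length below -idx (what Pre_ guarantees, on pairs)
def POk (idx : Int) (l : List (Int × List Int)) : Prop :=
  l.Pairwise (fun a b => a.2.length = b.2.length → -idx ≤ (a.2.length : Int))

theorem PProc_perm (idx : Int) : ∀ (n : Nat) (l : List (Int × List Int)), l.length = n →
    (0 ≤ idx ∨ POk idx l) →
    (PProc idx l).Perm (allB idx (keysetB idx l) l) := by
  intro n
  induction n using Nat.strong_induction_on with
  | _ n ih =>
  intro l hn hp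
  match l with
  | [] =>
      rw [PProc_nil]
      unfold allB inertB gFlat keysetB
      simp
  | (p, c) :: rest =>
      have hlen : rest.length < n := by simp at hn; omega
      have hpr : 0 ≤ idx ∨ POk idx rest := by
        rcases hp with h | h
        · exact Or.inl h
        · exact Or.inr (List.Pairwise.of_cons h)
      cases hk : keyO idx c with
      | none =>
          have hcnd : ∀ e ∈ rest, fcCond idx c e.2 = false := by
            intro e he
            unfold keyO at hk
            split at hk
            · exact absurd hk (by simp)
            · rename_i hc
              by_cases h0 : 0 ≤ idx
              · apply fcCond_false_len_le
                omega
              · have hclen : (c.length : Int) < -idx := by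
                  omega
                have hPok : POk idx ((p, c) :: rest) := by
                  rcases hp with h | h
                  · omega
                  · exact h
                have hrel : c.length = e.2.length → -idx ≤ (c.length : Int) :=
                  (List.pairwise_cons.mp hPok).1 e he
                apply fcCond_false_len_ne
                intro hlen2
                have := hrel hlen2
                omega
          have H1 : PProc idx ((p, c) :: rest) = (p, c) :: PProc idx rest := by
            rw [PProc_cons, pFold_id idx c rest rest hcnd]
          exact assemble_inert idx p c rest hk H1 (ih rest.length hlen rest rfl hpr)
      | some K =>
          by_cases hne1 : idx = -1
          · -- at idx = -1 neither side ever combines: the bucket holds one repeated case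
            subst hne1
            have hcnd : ∀ e ∈ rest, fcCond (-1) c e.2 = false :=
              fun e _ => fcCond_false_neg_one c e.2
            have H1 : PProc (-1) ((p, c) :: rest) = (p, c) :: PProc (-1) rest := by
              rw [PProc_cons, pFold_id (-1) c rest rest hcnd]
            have hallc : ∀ pc ∈ filterB (-1) ((p, c) :: rest) K, pc.2 = c := by
              intro pc hpc
              have hkey : keyO (-1) pc.2 = some K := by
                have := List.of_mem_filter hpc
                simpa using this
              exact keyO_neg_one_inj pc.2 c K hkey hk
            have hfcons : filterB (-1) ((p, c) :: rest) K = (p, c) :: filterB (-1) rest K := by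
              unfold filterB
              rw [List.filter_cons, if_pos (by simp [hk])]
            have H2 : bGroup (-1) (filterB (-1) ((p, c) :: rest) K) =
                (p, c) :: bGroup (-1) (filterB (-1) rest K) := by
              rw [bGroup_const (-1) c _ hallc,
                bGroup_const (-1) c _ (by
                  intro pc hpc
                  exact hallc pc (by rw [hfcons]; exact List.mem_cons_of_mem _ hpc)),
                hfcons]
            exact assemble (-1) p c c rest rest K hk H1 H2 (fun k _ => rfl) rfl
              (ih rest.length hlen rest rfl hpr)
          · -- the combining case
            have hgood : -(c.length : Int) ≤ idx ∧ idx < (c.length : Int) := by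
              unfold keyO at hk
              split at hk
              · rename_i hc; exact hc
              · exact absurd hk (by simp)
            have hKval : K = bKey c idx := by
              unfold keyO at hk
              rw [if_pos hgood] at hk
              injection hk with hk
              exact hk.symm
            set pre := PySem.List.slice c none (some idx) with hpre
            set suf := PySem.List.slice c (some (idx + 1)) none with hsuf
            have hKtuple : K = ((c.length : Int), pre, suf) := hKval
            have hS := sliceAt_of_good idx c.length hgood hne1
            have hcfacts := hS.2.2 c rfl
            have hpreT : pre = c.take (natPos idx c.length) := hcfacts.1
            have hsufD : suf = c.drop (natPos idx c.length + 1) := hcfacts.2.1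
            have hprelen : pre.length = natPos idx c.length := by
              rw [hpreT, List.length_take]
              have := hS.1
              omega
            have hctx : GroupCtx idx c.length pre suf := by
              refine ⟨?_, ?_, ?_⟩
              · rw [hprelen]
                exact hS
              · rw [hprelen, hsufD, List.length_drop]
                have := hS.1
                omega
              · exact hgood.1
            have hkc : keyO idx c = some ((c.length : Int), pre, suf) := by
              rw [hk, hKtuple]
            set v0 := c.getD pre.length 0 with hv0
            set vs := valsG idx pre.length ((c.length : Int), pre, suf) rest with hvs
            set ts := (sT vs v0).2 with hts
            set rest' := ts.foldl (fun R v => removeLastSnd R (mkCase pre suf v)) rest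
              with hrest'
            have hceq : c = mkCase pre suf v0 :=
              (keyO_some_iff idx c.length pre suf hctx c).mp hkc
            have hsweep : rest.foldl (pStep idx) (c, rest) =
                (mkCase pre suf (sT vs v0).1, rest') := by
              conv_lhs => rw [hceq]
              rw [sweep_char idx c.length pre suf hctx rest v0 rest]
            have H1 : PProc idx ((p, c) :: rest) =
                (p, mkCase pre suf (sT vs v0).1) :: PProc idx rest' := by
              rw [PProc_cons, hsweep]
            have H2 := bGroup_step idx c.length pre suf hctx p c rest hkc
            have H3 : ∀ k, k ≠ K → filterB idx rest' k = filterB idx rest k := by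
              intro k hkk
              rw [hrest']
              exact filterB_fold_ne idx c.length pre suf hctx k
                (by rw [hKtuple] at hkk; exact hkk) ts rest
            have H4 : inertB idx rest' = inertB idx rest := by
              rw [hrest']
              exact inertB_fold idx c.length pre suf hctx ts rest
            have Hsub : rest'.Sublist rest := by
              have h := pFold_sublist idx rest c rest
              rw [hsweep] at h
              exact h
            have hpr' : 0 ≤ idx ∨ POk idx rest' := by
              rcases hpr with h | h
              · exact Or.inl h
              · exact Or.inr (List.Pairwise.sublist Hsub h)
            have hih := ih rest'.length (by have := Hsub.length_le; omega) rest' rfl hpr'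
            refine assemble idx p c (mkCase pre suf (sT vs v0).1) rest rest' K hk H1 ?_ H3 H4 hih
            rw [hKtuple]
            exact H2

theorem PProc_fst_mem (idx : Int) : ∀ (n : Nat) (l : List (Int × List Int)), l.length = n →
    ∀ q ∈ PProc idx l, ∃ e ∈ l, q.1 = e.1 := by
  intro n
  induction n using Nat.strong_induction_on with
  | _ n ih =>
  intro l hn q hq
  match l with
  | [] => rw [PProc_nil] at hq; simp at hq
  | (p, c) :: rest =>
      rw [PProc_cons] at hq
      rcases List.mem_cons.mp hq with h | h
      · exact ⟨(p, c), by simp, by rw [h]⟩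
      · have hsub := pFold_sublist idx rest c rest
        have hlen2 : (rest.foldl (pStep idx) (c, rest)).2.length < n := by
          have := hsub.length_le
          simp at hn
          omega
        rcases ih _ hlen2 _ rfl q h with ⟨e, he, hqe⟩
        exact ⟨e, by simp [hsub.subset he], hqe⟩

theorem PProc_pairwise_gt (idx : Int) : ∀ (n : Nat) (l : List (Int × List Int)),
    l.length = n → l.Pairwise (fun a b => b.1 < a.1) →
    (PProc idx l).Pairwise (fun a b => b.1 < a.1) := by
  intro n
  induction n using Nat.strong_induction_on with
  | _ n ih =>
  intro l hn hpw
  match l with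
  | [] => rw [PProc_nil]; exact List.Pairwise.nil
  | (p, c) :: rest =>
      rw [PProc_cons]
      have hsub := pFold_sublist idx rest c rest
      have hlen2 : (rest.foldl (pStep idx) (c, rest)).2.length < n := by
        have := hsub.length_le
        simp at hn
        omega
      rcases List.pairwise_cons.mp hpw with ⟨hhead, htail⟩
      refine List.Pairwise.cons ?_ (ih _ hlen2 _ rfl (List.Pairwise.sublist hsub htail))
      intro q hq
      rcases PProc_fst_mem idx _ _ rfl q hq with ⟨e, he, hqe⟩
      simp only
      rw [hqe]
      exact hhead e (hsub.subset he)

-- ===== VERDICT (by name: the statements are the Claim_ definitions above) =====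
theorem factorize_cases_spec : Claim_equal_factorize_cases := by
  unfold Claim_equal_factorize_cases Spec_factorize_cases
  intro cases idx _ hpre
  set L := PySem.List.enumerate cases 0 with hL
  set M := L.reverse with hM
  have hsnd : M.map (·.2) = cases.reverse := by
    rw [hM, List.map_reverse, hL, PySem.List.map_snd_enumerate]
  have hA : factorize_cases cases idx = (PProc idx M).map (·.2) := by
    unfold factorize_cases
    have h := fcOuter_eq_PProc idx M
    rw [hsnd, List.reverse_reverse] at h
    exact h
  have hpok : 0 ≤ idx ∨ POk idx M := by
    unfold Pre_factorize_cases at hpre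
    rcases hpre with h | h
    · exact Or.inl h
    · right
      unfold POk
      rw [List.pairwise_map] at h
      have h2 : cases.reverse.Pairwise
          (fun a b => a.length = b.length → -idx ≤ (a.length : Int)) := by
        rw [List.pairwise_reverse]
        refine h.imp ?_
        intro a b hab hh
        rw [hh]
        exact hab hh.symm
      have h3 : (M.map (·.2)).Pairwise
          (fun a b => a.length = b.length → -idx ≤ (a.length : Int)) := by
        rw [hsnd]
        exact h2
      rw [List.pairwise_map] at h3
      exact h3
  have hperm : (PProc idx M).Perm (allB idx (keysetB idx M) M) :=
    PProc_perm idx M.length M rfl hpok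
  have hpw : (PProc idx M).Pairwise (fun a b => b.1 < a.1) := by
    apply PProc_pairwise_gt idx M.length M rfl
    rw [hM, List.pairwise_reverse]
    exact PySem.List.pairwise_lt_enumerate cases 0
  rw [hA, alt_eq_sorted]
  congr 1
  refine (PySem.List.sorted_rev_eq_of_perm_of_pairwise_gt _ _
    (fun r : Int × List Int => r.1) ?_ hpw).symm
  refine hperm.trans ?_
  unfold allB
  refine List.Perm.append ?_ ?_
  · rw [hM, inertB_reverse]
    exact (inertB idx L).reverse_perm
  · apply gFlat_perm_of_support idx _ _ M (nodup_keysetB idx M) (nodup_keysetB idx L)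
    intro k _
    unfold keysetB
    rw [PySem.Set.mem_ofList, PySem.Set.mem_ofList, hM]
    constructor
    · intro h
      rcases List.mem_filterMap.mp h with ⟨pc, hpc, hkpc⟩
      exact List.mem_filterMap.mpr ⟨pc, List.mem_reverse.mp hpc, hkpc⟩
    · intro h
      rcases List.mem_filterMap.mp h with ⟨pc, hpc, hkpc⟩
      exact List.mem_filterMap.mpr ⟨pc, List.mem_reverse.mpr hpc, hkpc⟩

@[simp]
theorem factorize_cases_raises : Claim_raises_factorize_cases := by
  unfold Claim_raises_factorize_cases
  refine ⟨?_, by decide⟩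
  intro cases idx _ hr hp
  rcases hr with ⟨h1, h2⟩
  rcases hp with h | h
  · omega
  · exact h2 h
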